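-- pv_equiv track=rewrite | github.com/MGezault/Cours | DevPython/TP#5/ex4.py | est_decroissante
-- ===== SOURCE A (Python) =====
-- def est_decroissante(liste_score):
--      """Vérifie que les meilleurs scores sont bien triés dans l’ordre décroissant
--
--      Args:
--          liste_score (list): la liste des scores que l'ont veut analyser
--
--      Returns:
--          bool: Si la liste est bien triée
--      """
--      prec = None
--     #Pour chaque tour de boucle, prec vaudra la valeur précédente rencontrée dans la liste afin de la comparé à la nouvelle
--      for elem in liste_score:
--           if (prec is None) or (elem<= prec):
--                prec = elem
--           else:
--                return False
--      return True
-- ===== SOURCE B (Python) =====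
-- def est_decroissante(liste_score):
--     """Sort-then-compare: the list is non-increasing iff it equals its reverse-sorted copy."""
--     return liste_score == sorted(liste_score, reverse=True)
-- ===== Notes on version B (the rewrite author's own statement) =====
-- stated objective: idiomatic
-- what changed: Replaced the explicit adjacent-pair loop carrying a 'previous element' sentinel by a one-line sort-then-compare: the list is non-increasing iff it equals sorted(liste_score, reverse=True).
import Mathlib
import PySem

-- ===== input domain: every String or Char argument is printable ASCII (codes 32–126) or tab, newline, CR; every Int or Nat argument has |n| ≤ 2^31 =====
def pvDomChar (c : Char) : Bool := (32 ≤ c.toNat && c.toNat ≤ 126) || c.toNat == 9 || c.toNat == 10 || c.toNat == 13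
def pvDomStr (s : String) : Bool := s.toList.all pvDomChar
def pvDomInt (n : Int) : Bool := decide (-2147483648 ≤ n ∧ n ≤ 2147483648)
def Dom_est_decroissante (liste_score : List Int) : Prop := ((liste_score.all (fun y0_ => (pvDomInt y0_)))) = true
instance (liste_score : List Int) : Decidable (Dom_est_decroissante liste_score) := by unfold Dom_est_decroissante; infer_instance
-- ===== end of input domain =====

-- B replaces A's adjacent-pair loop by a sort-then-compare one-liner (idiomatic); return value only.
-- ===== PORT A =====
def pvLoopA : Option Int → List Int → Bool
  | _, [] => true
  | none, elem :: rest => pvLoopA (some elem) rest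
  | some prec, elem :: rest => if elem ≤ prec then pvLoopA (some elem) rest else false

def est_decroissante (liste_score : List Int) : Bool := pvLoopA none liste_score

-- ===== PORT B =====
def est_decroissante_alt (liste_score : List Int) : Bool := decide (liste_score = PySem.List.sorted liste_score (fun x => x) true)

-- ===== PRECONDITION & SPEC =====
def Spec_est_decroissante (liste_score : List Int) (out : Bool) : Prop := out = est_decroissante_alt liste_score
instance (liste_score : List Int) (out : Bool) : Decidable (Spec_est_decroissante liste_score out) := by unfold Spec_est_decroissante; infer_instance

-- ===== CLAIM (what is proved, stated in full; the proofs are below) =====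
def Claim_equal_est_decroissante : Prop := ∀ (liste_score : List Int), Dom_est_decroissante liste_score → Spec_est_decroissante liste_score (est_decroissante liste_score)

-- ===== LEMMAS AND PROOFS =====

lemma pvLoopA_some_iff (l : List Int) : ∀ (p : Int),
    pvLoopA (some p) l = true ↔ (p :: l).Pairwise (fun a b => b ≤ a) := by
  induction l with
  | nil => intro p; simp [pvLoopA]
  | cons e rest ih =>
    intro p
    simp only [pvLoopA]
    split_ifs with h
    · rw [ih]
      constructor
      · intro hp
        refine List.pairwise_cons.mpr ⟨?_, hp⟩
        intro a ha
        rcases List.mem_cons.mp ha with rfl | ha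
        · exact h
        · exact le_trans ((List.pairwise_cons.mp hp).1 a ha) h
      · intro hp
        exact (List.pairwise_cons.mp hp).2
    · simp only [false_iff]
      intro hc
      exact h ((List.pairwise_cons.mp hc).1 e (List.mem_cons_self ..))

lemma est_decroissante_iff (l : List Int) :
    est_decroissante l = true ↔ l.Pairwise (fun a b => b ≤ a) := by
  cases l with
  | nil => simp [est_decroissante, pvLoopA]
  | cons x rest =>
    show pvLoopA (some x) rest = true ↔ _
    exact pvLoopA_some_iff rest x

lemma est_decroissante_alt_iff (l : List Int) :
    est_decroissante_alt l = true ↔ l.Pairwise (fun a b => b ≤ a) := by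
  unfold est_decroissante_alt
  rw [decide_eq_true_iff]
  constructor
  · intro h
    have := PySem.List.sorted_pairwise_rev (xs := l) (key := fun x => x)
    rw [← h] at this
    exact this
  · intro h
    exact (PySem.List.sorted_rev_eq_self_of_pairwise (xs := l) (key := fun x => x) h).symm

-- ===== VERDICT (by name: the statement is the Claim_ definition above) =====
theorem est_decroissante_spec : Claim_equal_est_decroissante := by
  intro l _
  unfold Spec_est_decroissante
  rw [Bool.eq_iff_iff, est_decroissante_iff, est_decroissante_alt_iff]
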